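-- pv_equiv track=rewrite | github.com/JackzhangLOVEcode/qtprj2-ver1.0 | mainWin.py | showSuitableCarrier
-- ===== SOURCE A (Python) =====
-- def showSuitableCarrier(Mtype, SNRarray):
--     threshold = [8, 13, 22, 30][Mtype]
--     base = 0
--     pointer = len(SNRarray)
--     for snr in SNRarray:
--         pointer -= 1
--         if snr >= threshold:
--             base += 2**(pointer)
--     return format(base, 'x').zfill(5)
-- ===== SOURCE B (Python) =====
-- def showSuitableCarrier(Mtype, SNRarray):
--     threshold = [8, 13, 22, 30][Mtype]
--     bits = ''.join('1' if snr >= threshold else '0' for snr in SNRarray)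
--     base = int(bits, 2) if bits else 0
--     return format(base, 'x').zfill(5)
-- ===== Notes on version B (the rewrite author's own statement) =====
-- stated objective: simpler
-- what changed: Replaces the manual pointer/2**pointer bit accumulation with building a textual binary string and one int(bits, 2) conversion.
import Mathlib
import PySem

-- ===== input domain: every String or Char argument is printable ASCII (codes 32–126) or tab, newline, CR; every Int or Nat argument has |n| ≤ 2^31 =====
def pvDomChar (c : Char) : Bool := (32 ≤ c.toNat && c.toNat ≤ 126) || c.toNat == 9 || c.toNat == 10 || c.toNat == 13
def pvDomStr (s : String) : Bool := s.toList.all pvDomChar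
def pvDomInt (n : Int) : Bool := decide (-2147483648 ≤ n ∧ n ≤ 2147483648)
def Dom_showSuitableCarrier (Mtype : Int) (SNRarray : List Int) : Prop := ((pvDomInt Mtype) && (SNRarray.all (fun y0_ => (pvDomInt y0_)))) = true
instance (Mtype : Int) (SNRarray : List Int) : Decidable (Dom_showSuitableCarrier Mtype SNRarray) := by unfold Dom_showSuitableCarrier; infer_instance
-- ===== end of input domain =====

-- B builds a binary digit string and converts it once with int(bits, 2) instead of
-- accumulating 2**pointer terms; same return value, objective: simpler decomposition.

-- shared helper: Python's format(n, 'x') for a nonnegative n (both Pythons call this library routine)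
def pyHexDigit (d : Nat) : Char := if d < 10 then Char.ofNat (48 + d) else Char.ofNat (87 + d)

def pyHexChars : Nat → List Char
  | 0 => []
  | n + 1 => pyHexChars ((n + 1) / 16) ++ [pyHexDigit ((n + 1) % 16)]
decreasing_by exact Nat.div_lt_self (Nat.succ_pos n) (by norm_num)

def pyFormatHex (n : Nat) : List Char := if n = 0 then ['0'] else pyHexChars n

-- ===== PORT A =====
def showSuitableCarrier (Mtype : Int) (SNRarray : List Int) : String :=
  let threshold := (PySem.List.pyGet? ([8, 13, 22, 30] : List Int) Mtype).getD 0
  let r := SNRarray.foldl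
    (fun (p : Nat × Nat) snr =>
      let pointer := p.2 - 1
      (if snr ≥ threshold then p.1 + 2 ^ pointer else p.1, pointer))
    (0, SNRarray.length)
  PySem.Str.zfill (String.mk (pyFormatHex r.1)) 5

-- ===== PORT B =====
def showSuitableCarrier_alt (Mtype : Int) (SNRarray : List Int) : String :=
  let threshold := (PySem.List.pyGet? ([8, 13, 22, 30] : List Int) Mtype).getD 0
  let bits := SNRarray.map (fun snr => if snr ≥ threshold then '1' else '0')
  let base := bits.foldl (fun acc c => acc * 2 + (if c = '1' then 1 else 0)) 0
  PySem.Str.zfill (String.mk (pyFormatHex base)) 5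

-- ===== PRECONDITION & SPEC =====
-- Pre_ excludes exactly the Mtype values for which [8,13,22,30][Mtype] raises IndexError.
def Pre_showSuitableCarrier (Mtype : Int) (SNRarray : List Int) : Prop :=
  -4 ≤ Mtype ∧ Mtype < 4
instance (Mtype : Int) (SNRarray : List Int) : Decidable (Pre_showSuitableCarrier Mtype SNRarray) := by
  unfold Pre_showSuitableCarrier; infer_instance

def pvWitness_showSuitableCarrier : Int × List Int := (1, [5, 20, 13])

def Spec_showSuitableCarrier (Mtype : Int) (SNRarray : List Int) (out : String) : Prop := out = showSuitableCarrier_alt Mtype SNRarray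
instance (Mtype : Int) (SNRarray : List Int) (out : String) : Decidable (Spec_showSuitableCarrier Mtype SNRarray out) := by unfold Spec_showSuitableCarrier; infer_instance

-- ===== CLAIM (what is proved, stated in full; the proofs are below) =====
def Claim_equal_showSuitableCarrier : Prop := ∀ (Mtype : Int) (SNRarray : List Int), Dom_showSuitableCarrier Mtype SNRarray → Pre_showSuitableCarrier Mtype SNRarray → Spec_showSuitableCarrier Mtype SNRarray (showSuitableCarrier Mtype SNRarray)

-- ===== LEMMAS AND PROOFS =====

-- Horner fold of B with a generalized accumulator
theorem horner_acc (cs : List Char) (a : Nat) :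
    cs.foldl (fun acc c => acc * 2 + (if c = '1' then 1 else 0)) a
      = a * 2 ^ cs.length + cs.foldl (fun acc c => acc * 2 + (if c = '1' then 1 else 0)) 0 := by
  induction cs generalizing a with
  | nil => simp
  | cons c cs ih =>
    simp only [List.foldl_cons, List.length_cons]
    rw [ih (a * 2 + _), ih (0 * 2 + _)]
    ring

-- A's loop, run with pointer = remaining length and accumulator b, equals b + B's Horner value
theorem loop_eq (t : Int) (xs : List Int) (b : Nat) :
    (xs.foldl
      (fun (p : Nat × Nat) snr =>
        let pointer := p.2 - 1
        (if snr ≥ t then p.1 + 2 ^ pointer else p.1, pointer))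
      (b, xs.length)).1
    = b + (xs.map (fun snr => if snr ≥ t then '1' else '0')).foldl
        (fun acc c => acc * 2 + (if c = '1' then 1 else 0)) 0 := by
  induction xs generalizing b with
  | nil => simp
  | cons x xs ih =>
    simp only [List.foldl_cons, List.length_cons, List.map_cons, Nat.add_sub_cancel]
    rw [ih, horner_acc _ (0 * 2 + _)]
    by_cases h : x ≥ t <;> simp [h] <;> ring

-- ===== VERDICT (by name: the statement is the Claim_ definition above) =====
theorem showSuitableCarrier_spec : Claim_equal_showSuitableCarrier := by
  intro Mtype SNRarray _ _
  unfold Spec_showSuitableCarrier showSuitableCarrier showSuitableCarrier_alt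
  simp only [loop_eq, Nat.zero_add]
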